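-- pv_equiv track=rewrite | github.com/gph03n1x/scarletmoon | core/queries/query.py | sort_query
-- ===== SOURCE A (Python) =====
-- import heapq
--
-- priorities = {
--     ":and:": 1,
--     ":or:": 1,
--     ":not:": 2
-- }
--
-- def sort_query(query, default_op=":and:"):
--     selected_priority = priorities[default_op]
--     selected_operation = default_op
--     heap = []
--     for query_part in query:
--         if query_part in priorities.keys():
--             selected_priority = priorities[query_part]
--             selected_operation = query_part
--         else:
--             heapq.heappush(heap, (selected_priority, selected_operation + " " + query_part))
--             selected_priority = priorities[default_op]
--             selected_operation = default_op
--
--     return " ".join([heapq.heappop(heap)[1] for _iteration in range(len(heap))]).split(" ", 1)[1].split()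
-- ===== SOURCE B (Python) =====
-- priorities = {
--     ":and:": 1,
--     ":or:": 1,
--     ":not:": 2
-- }
--
-- def sort_query(query, default_op=":and:"):
--     # Bucket each plain token under its effective operator; no (priority, phrase)
--     # tuples and no global comparison sort: the fixed bucket order :and:, :or:,
--     # :not: (operators sorted by (priority, operator)) already realises the
--     # priority order, and within a bucket plain string order of the parts is the
--     # phrase order, since every phrase of a bucket shares the "op " prefix.
--     buckets = {op: [] for op in sorted(priorities, key=lambda op: (priorities[op], op))}
--     pending = None
--     for part in query:
--         if part in buckets:
--             pending = part
--         else: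
--             buckets[pending if pending is not None else default_op].append(part)
--             pending = None
--     ordered = [op + " " + part for op, parts in buckets.items() for part in sorted(parts)]
--     return " ".join(ordered).split(" ", 1)[1].split()
-- ===== Notes on version B (the rewrite author's own statement) =====
-- stated objective: alternative
-- what changed: Replaces A's comparison sort of (priority, phrase) tuples via a heap (heappush per item, heappop drain) by a bucket scheme with no tuples and no tuple comparisons: tokens are grouped under their effective operator into three buckets, each bucket's bare parts are string-sorted, and buckets are emitted in the fixed order :and:, :or:, :not:, which provably realises A's (priority, phrase) order because phrases of one bucket share the operator prefix and the operators string-sort in that order within each priority.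
import Mathlib
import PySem

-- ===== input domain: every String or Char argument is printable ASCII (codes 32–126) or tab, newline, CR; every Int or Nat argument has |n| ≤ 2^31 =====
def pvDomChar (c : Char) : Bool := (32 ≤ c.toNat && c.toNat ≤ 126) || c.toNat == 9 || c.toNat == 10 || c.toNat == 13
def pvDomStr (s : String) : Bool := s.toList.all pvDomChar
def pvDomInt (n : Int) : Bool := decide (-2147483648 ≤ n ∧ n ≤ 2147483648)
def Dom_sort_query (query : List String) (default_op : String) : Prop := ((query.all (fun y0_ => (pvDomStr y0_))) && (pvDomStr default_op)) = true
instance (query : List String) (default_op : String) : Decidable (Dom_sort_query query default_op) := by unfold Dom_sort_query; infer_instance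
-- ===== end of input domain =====

-- B replaces A's heap of (priority, phrase) tuples (heappush per item, heappop drain) by a
-- bucket scheme with no tuples: tokens are grouped under their effective operator, each
-- bucket's bare parts are string-sorted, and the buckets are emitted in the fixed order
-- :and:, :or:, :not:, which realises A's tuple order; objective: alternative.


-- ===== PORT A =====
-- module constant 'priorities'
def priorities : PySem.Dict String Int :=
  PySem.Dict.mk [(":and:", 1), (":or:", 1), (":not:", 2)]

-- Python's tuple '<' on (int, str): lexicographic (Python str '<' is Lean String '<', per PySem)
def pyLexLt (a b : Int × String) : Bool :=
  decide (a.1 < b.1) || (!decide (b.1 < a.1) && decide (a.2 < b.2))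

-- heapq.heappush / heappop ported by their observable priority-queue semantics (exact for
-- len and for the sequence of pops, which is all A uses: pops come out in nondecreasing
-- tuple order, and tuples comparing equal are identical values): the heap list is kept in
-- nondecreasing pyLexLt order, push = ordered insert, pop = head.
def heappush (heap : List (Int × String)) (x : Int × String) : List (Int × String) :=
  PySem.List.insertBy pyLexLt x heap

-- one iteration of A's 'for query_part in query' loop; state = (selected_priority, selected_operation, heap)
def stepA (default_op : String) (st : Int × String × List (Int × String)) (qp : String) :
    Int × String × List (Int × String) :=
  if priorities.contains qp then (priorities.getD qp 0, qp, st.2.2)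
  else (priorities.getD default_op 0, default_op, heappush st.2.2 (st.1, st.2.1 ++ " " ++ qp))

-- '[heapq.heappop(heap)[1] for _iteration in range(len(heap))]' (pop = head of the ordered list)
def drainPops : Nat → List (Int × String) → List String
  | 0, _ => []
  | _ + 1, [] => []          -- unreachable: the count is len(heap)
  | n + 1, p :: rest => p.2 :: drainPops n rest

-- '" ".join(strings).split(" ", 1)[1].split()'; [1] on a 1-element list is IndexError (excluded by Pre_)
def joinSplitTail (strings : List String) : List String :=
  let joined := PySem.Str.join " " strings
  let parts := (PySem.Str.splitMax? joined " " 1).getD []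
  PySem.Str.split₀ ((PySem.List.pyGet? parts 1).getD "")

def sort_query (query : List String) (default_op : String) : List String :=
  let st := query.foldl (stepA default_op) (priorities.getD default_op 0, default_op, [])
  let heap := st.2.2
  joinSplitTail (drainPops heap.length heap)

-- ===== PORT B =====
-- one iteration of B's loop; state = (pending operator or None, the buckets dict)
def stepB (default_op : String) (st : Option String × PySem.Dict String (List String))
    (part : String) : Option String × PySem.Dict String (List String) :=
  if st.2.contains part then (some part, st.2)
  else
    let op := st.1.getD default_op
    (none, st.2.modify op [] (fun l => l ++ [part]))   -- buckets[op].append(part)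

def sort_query_alt (query : List String) (default_op : String) : List String :=
  -- {op: [] for op in sorted(priorities, key=lambda op: (priorities[op], op))}
  let buckets0 : PySem.Dict String (List String) :=
    (PySem.List.sorted2 priorities.keys (fun op => priorities.getD op 0) (fun op => op)).foldl
      (fun d op => d.insert op ([] : List String)) PySem.Dict.empty
  let st := query.foldl (stepB default_op) (none, buckets0)
  -- [op + " " + part for op, parts in buckets.items() for part in sorted(parts)]
  let ordered := st.2.items.flatMap (fun pr =>
    (PySem.List.sorted pr.2 (fun x => x) false).map (fun part => pr.1 ++ " " ++ part))
  joinSplitTail ordered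

-- ===== PRECONDITION & SPEC =====
-- Pre_ excludes exactly the inputs where the Python A raises: a default_op that is not an
-- operator (KeyError on the first line), and a query with no non-operator token (the heap
-- stays empty, so '.split(" ", 1)[1]' is an IndexError).
def Pre_sort_query (query : List String) (default_op : String) : Prop :=
  default_op ∈ [":and:", ":or:", ":not:"] ∧
    ∃ q ∈ query, q ∉ [":and:", ":or:", ":not:"]
instance (query : List String) (default_op : String) : Decidable (Pre_sort_query query default_op) := by
  unfold Pre_sort_query; infer_instance

def pvWitness_sort_query : List String × String := ([":not:", "apple", "pie"], ":and:")

def Spec_sort_query (query : List String) (default_op : String) (out : List String) : Prop :=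
  out = sort_query_alt query default_op
instance (query : List String) (default_op : String) (out : List String) : Decidable (Spec_sort_query query default_op out) := by
  unfold Spec_sort_query; infer_instance

-- ===== CLAIM (what is proved, stated in full; the proofs are below) =====
def Claim_equal_sort_query : Prop := ∀ (query : List String) (default_op : String), Dom_sort_query query default_op → Pre_sort_query query default_op → Spec_sort_query query default_op (sort_query query default_op)

-- ===== LEMMAS AND PROOFS =====

-- sorted(parts) with no key, and the phrase-builders / block decomposition of the heap
def sSt (l : List String) : List String := PySem.List.sorted l (fun x => x) false
def fA (p : String) : Int × String := (1, ":and:" ++ " " ++ p)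
def fO (p : String) : Int × String := (1, ":or:" ++ " " ++ p)
def fN (p : String) : Int × String := (2, ":not:" ++ " " ++ p)
def blocks3 (la lo ln : List String) : List (Int × String) :=
  (sSt la).map fA ++ ((sSt lo).map fO ++ (sSt ln).map fN)
def mkB (la lo ln : List String) : PySem.Dict String (List String) :=
  ((PySem.Dict.empty.insert ":and:" la).insert ":or:" lo).insert ":not:" ln
def goodPend (pend : Option String) : Prop :=
  pend = none ∨ pend = some ":and:" ∨ pend = some ":or:" ∨ pend = some ":not:"

lemma insertBy_nil {α : Type} (before : α → α → Bool) (x : α) :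
    PySem.List.insertBy before x [] = [x] := rfl

lemma insertBy_cons {α : Type} (before : α → α → Bool) (x y : α) (ys : List α) :
    PySem.List.insertBy before x (y :: ys)
      = if before x y then x :: y :: ys else y :: PySem.List.insertBy before x ys := rfl

lemma insertBy_append_skip {α : Type} (before : α → α → Bool) (x : α) (pre rest : List α)
    (h : ∀ y ∈ pre, before x y = false) :
    PySem.List.insertBy before x (pre ++ rest) = pre ++ PySem.List.insertBy before x rest := by
  induction pre with
  | nil => rfl
  | cons y ys ih =>
    simp [insertBy_cons, h y (by simp), ih (fun z hz => h z (by simp [hz]))]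

lemma insertBy_append_stop {α : Type} (before : α → α → Bool) (x : α) (l t : List α)
    (h : ∀ y ∈ t, before x y = true) :
    PySem.List.insertBy before x (l ++ t) = PySem.List.insertBy before x l ++ t := by
  induction l with
  | nil =>
    cases t with
    | nil => rfl
    | cons u us => simp [insertBy_cons, h u (by simp), insertBy_nil]
  | cons y ys ih =>
    simp only [List.cons_append, insertBy_cons]
    by_cases hb : before x y
    · simp [hb]
    · simp [hb, ih]

lemma insertBy_map {α β : Type} (g : α → β) (before : α → α → Bool) (before' : β → β → Bool)
    (h : ∀ a b, before' (g a) (g b) = before a b) (p : α) (bs : List α) :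
    PySem.List.insertBy before' (g p) (bs.map g) = (PySem.List.insertBy before p bs).map g := by
  induction bs with
  | nil => rfl
  | cons y ys ih =>
    simp only [List.map_cons, insertBy_cons, h]
    by_cases hb : before p y
    · simp [hb]
    · simp [hb, ih]

lemma lex_append_iff (s a b : List Char) :
    List.Lex (· < ·) (s ++ a) (s ++ b) ↔ List.Lex (· < ·) a b := by
  induction s with
  | nil => simp
  | cons c cs ih =>
    constructor
    · intro h
      cases h with
      | rel h => exact absurd h (lt_irrefl c)
      | cons h => exact ih.mp h
    · intro h
      exact List.Lex.cons (ih.mpr h)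

lemma str_append_lt_iff (s a b : String) : s ++ a < s ++ b ↔ a < b := by
  rw [String.lt_iff_toList_lt, String.lt_iff_toList_lt]
  simpa [String.toList_append] using lex_append_iff s.toList a.toList b.toList

lemma and_lt_or (p q : String) : ":and:" ++ " " ++ p < ":or:" ++ " " ++ q := by
  rw [String.lt_iff_toList_lt]
  have h1 : (":and:" ++ " " ++ p).toList = ':' :: 'a' :: 'n' :: 'd' :: ':' :: ' ' :: p.toList := by
    simp [String.toList_append]
  have h2 : (":or:" ++ " " ++ q).toList = ':' :: 'o' :: 'r' :: ':' :: ' ' :: q.toList := by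
    simp [String.toList_append]
  rw [h1, h2]
  exact List.Lex.cons (List.Lex.rel (by decide))

lemma not_or_lt_and (p q : String) : ¬ (":or:" ++ " " ++ p < ":and:" ++ " " ++ q) := by
  intro h
  rw [String.lt_iff_toList_lt] at h
  have h1 : (":or:" ++ " " ++ p).toList = ':' :: 'o' :: 'r' :: ':' :: ' ' :: p.toList := by
    simp [String.toList_append]
  have h2 : (":and:" ++ " " ++ q).toList = ':' :: 'a' :: 'n' :: 'd' :: ':' :: ' ' :: q.toList := by
    simp [String.toList_append]
  rw [h1, h2] at h
  cases h with
  | rel h => exact absurd h (lt_irrefl ':')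
  | cons h =>
    cases h with
    | rel h => exact absurd h (by decide)

lemma pyLexLt_same (c : Int) (s t : String) : pyLexLt (c, s) (c, t) = decide (s < t) := by
  simp [pyLexLt]

lemma pyLexLt_12 (s t : String) : pyLexLt (1, s) (2, t) = true := by
  simp [pyLexLt]

lemma pyLexLt_21 (s t : String) : pyLexLt (2, s) (1, t) = false := by
  simp [pyLexLt]

lemma sSt_append (l : List String) (p : String) :
    sSt (l ++ [p]) = PySem.List.insertBy (fun a b : String => decide (a < b)) p (sSt l) := by
  simp [sSt, PySem.List.sorted_eq_foldl_insertBy, List.foldl_append]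

lemma insA (p : String) (la lo ln : List String) :
    heappush (blocks3 la lo ln) (fA p) = blocks3 (la ++ [p]) lo ln := by
  unfold heappush blocks3
  rw [insertBy_append_stop _ _ _ _ (by
    intro y hy
    rcases List.mem_append.mp hy with hy | hy
    · rcases List.mem_map.mp hy with ⟨q, _, rfl⟩
      show pyLexLt (1, ":and:" ++ " " ++ p) (1, ":or:" ++ " " ++ q) = true
      rw [pyLexLt_same]
      exact decide_eq_true (and_lt_or p q)
    · rcases List.mem_map.mp hy with ⟨q, _, rfl⟩
      exact pyLexLt_12 _ _)]
  rw [insertBy_map (fun p => fA p) (fun a b : String => decide (a < b)) pyLexLt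
    (by
      intro a b
      show pyLexLt (1, ":and:" ++ " " ++ a) (1, ":and:" ++ " " ++ b) = decide (a < b)
      rw [pyLexLt_same]
      exact decide_eq_decide.mpr (str_append_lt_iff (":and:" ++ " ") a b)) p (sSt la)]
  rw [sSt_append]

lemma insO (p : String) (la lo ln : List String) :
    heappush (blocks3 la lo ln) (fO p) = blocks3 la (lo ++ [p]) ln := by
  unfold heappush blocks3
  rw [insertBy_append_skip _ _ _ _ (by
    intro y hy
    rcases List.mem_map.mp hy with ⟨q, _, rfl⟩
    show pyLexLt (1, ":or:" ++ " " ++ p) (1, ":and:" ++ " " ++ q) = false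
    rw [pyLexLt_same]
    exact decide_eq_false (not_or_lt_and p q))]
  rw [insertBy_append_stop _ _ _ _ (by
    intro y hy
    rcases List.mem_map.mp hy with ⟨q, _, rfl⟩
    exact pyLexLt_12 _ _)]
  rw [insertBy_map (fun p => fO p) (fun a b : String => decide (a < b)) pyLexLt
    (by
      intro a b
      show pyLexLt (1, ":or:" ++ " " ++ a) (1, ":or:" ++ " " ++ b) = decide (a < b)
      rw [pyLexLt_same]
      exact decide_eq_decide.mpr (str_append_lt_iff (":or:" ++ " ") a b)) p (sSt lo)]
  rw [sSt_append]

lemma insN (p : String) (la lo ln : List String) :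
    heappush (blocks3 la lo ln) (fN p) = blocks3 la lo (ln ++ [p]) := by
  unfold heappush blocks3
  rw [insertBy_append_skip _ _ _ _ (by
    intro y hy
    rcases List.mem_map.mp hy with ⟨q, _, rfl⟩
    exact pyLexLt_21 _ _)]
  rw [insertBy_append_skip _ _ _ _ (by
    intro y hy
    rcases List.mem_map.mp hy with ⟨q, _, rfl⟩
    exact pyLexLt_21 _ _)]
  rw [insertBy_map (fun p => fN p) (fun a b : String => decide (a < b)) pyLexLt
    (by
      intro a b
      show pyLexLt (2, ":not:" ++ " " ++ a) (2, ":not:" ++ " " ++ b) = decide (a < b)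
      rw [pyLexLt_same]
      exact decide_eq_decide.mpr (str_append_lt_iff (":not:" ++ " ") a b)) p (sSt ln)]
  rw [sSt_append]

lemma contains_mkB (la lo ln : List String) (p : String) :
    (mkB la lo ln).contains p = priorities.contains p := rfl

lemma contains_priorities_iff (q : String) :
    priorities.contains q = true ↔ (q = ":and:" ∨ q = ":or:" ∨ q = ":not:") := by
  constructor
  · intro h
    by_contra hc
    simp only [not_or] at hc
    obtain ⟨h1, h2, h3⟩ := hc
    simp [priorities, PySem.Dict.contains] at h
    rcases h with h | h | h
    · exact h1 h.symm
    · exact h2 h.symm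
    · exact h3 h.symm
  · rintro (rfl | rfl | rfl) <;> rfl

lemma modify_mkB_and (la lo ln : List String) (p : String) :
    (mkB la lo ln).modify ":and:" [] (fun l => l ++ [p]) = mkB (la ++ [p]) lo ln := rfl
lemma modify_mkB_or (la lo ln : List String) (p : String) :
    (mkB la lo ln).modify ":or:" [] (fun l => l ++ [p]) = mkB la (lo ++ [p]) ln := rfl
lemma modify_mkB_not (la lo ln : List String) (p : String) :
    (mkB la lo ln).modify ":not:" [] (fun l => l ++ [p]) = mkB la lo (ln ++ [p]) := rfl

-- joint loop invariant: B's state is (pending, three buckets) and A's state is the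
-- corresponding (priority, operator, block-decomposed heap)
lemma loop_rel (d : String) (hd : d = ":and:" ∨ d = ":or:" ∨ d = ":not:") (l : List String) :
    ∀ (pend : Option String), goodPend pend → ∀ (la lo ln : List String),
      ∃ pend' la' lo' ln', goodPend pend' ∧
        l.foldl (stepB d) (pend, mkB la lo ln) = (pend', mkB la' lo' ln') ∧
        l.foldl (stepA d) (priorities.getD (pend.getD d) 0, pend.getD d, blocks3 la lo ln)
          = (priorities.getD (pend'.getD d) 0, pend'.getD d, blocks3 la' lo' ln') := by
  induction l with
  | nil =>
    intro pend hp la lo ln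
    exact ⟨pend, la, lo, ln, hp, rfl, rfl⟩
  | cons q rest ih =>
    intro pend hp la lo ln
    by_cases hq : priorities.contains q = true
    · have hB : stepB d (pend, mkB la lo ln) q = (some q, mkB la lo ln) := by
        simp [stepB, contains_mkB, hq]
      have hA : stepA d (priorities.getD (pend.getD d) 0, pend.getD d, blocks3 la lo ln) q
          = (priorities.getD ((some q : Option String).getD d) 0,
             (some q : Option String).getD d, blocks3 la lo ln) := by
        simp [stepA, hq]
      have hgp : goodPend (some q) := by
        rcases (contains_priorities_iff q).mp hq with rfl | rfl | rfl
        · exact Or.inr (Or.inl rfl)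
        · exact Or.inr (Or.inr (Or.inl rfl))
        · exact Or.inr (Or.inr (Or.inr rfl))
      simp only [List.foldl_cons, hB, hA]
      exact ih (some q) hgp la lo ln
    · have hop : pend.getD d = ":and:" ∨ pend.getD d = ":or:" ∨ pend.getD d = ":not:" := by
        rcases hp with rfl | rfl | rfl | rfl
        · simpa using hd
        · simp
        · simp
        · simp
      have hB : stepB d (pend, mkB la lo ln) q
          = (none, (mkB la lo ln).modify (pend.getD d) [] (fun l => l ++ [q])) := by
        simp [stepB, contains_mkB, hq]
      have hA : stepA d (priorities.getD (pend.getD d) 0, pend.getD d, blocks3 la lo ln) q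
          = (priorities.getD ((none : Option String).getD d) 0,
             (none : Option String).getD d,
             heappush (blocks3 la lo ln) (priorities.getD (pend.getD d) 0, pend.getD d ++ " " ++ q)) := by
        simp [stepA, hq]
      simp only [List.foldl_cons, hB, hA]
      rcases hop with hop | hop | hop
      · rw [hop, modify_mkB_and,
          show (priorities.getD ":and:" 0, (":and:" : String) ++ " " ++ q) = fA q from rfl, insA]
        exact ih none (Or.inl rfl) (la ++ [q]) lo ln
      · rw [hop, modify_mkB_or,
          show (priorities.getD ":or:" 0, (":or:" : String) ++ " " ++ q) = fO q from rfl, insO]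
        exact ih none (Or.inl rfl) la (lo ++ [q]) ln
      · rw [hop, modify_mkB_not,
          show (priorities.getD ":not:" 0, (":not:" : String) ++ " " ++ q) = fN q from rfl, insN]
        exact ih none (Or.inl rfl) la lo (ln ++ [q])

lemma drainPops_len (l : List (Int × String)) :
    drainPops l.length l = l.map Prod.snd := by
  induction l with
  | nil => rfl
  | cons p rest ih => simpa [drainPops] using ih

-- the dict comprehension's key order: sorted(priorities, key=lambda op: (priorities[op], op))
lemma sorted_ops : PySem.List.sorted2 priorities.keys (fun op => priorities.getD op 0) (fun op => op)
    = [":and:", ":or:", ":not:"] := by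
  simp only [PySem.List.sorted2]
  simp [insertBy_cons, insertBy_nil, priorities, PySem.Dict.getD, PySem.Dict.get?,
    (by decide : ¬ ((['o', 'r', ':'] : List Char) < ['a', 'n', 'd', ':']))]

lemma items_mkB (la lo ln : List String) :
    (mkB la lo ln).items = [(":and:", la), (":or:", lo), (":not:", ln)] := rfl

-- ===== VERDICT (by name: the statement is the Claim_ definition above) =====
theorem sort_query_spec : Claim_equal_sort_query := by
  intro query default_op _hdom hpre
  show sort_query query default_op = sort_query_alt query default_op
  have hd : default_op = ":and:" ∨ default_op = ":or:" ∨ default_op = ":not:" := by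
    simpa using hpre.1
  obtain ⟨pend', la', lo', ln', _, hB, hA⟩ :=
    loop_rel default_op hd query none (Or.inl rfl) [] [] []
  have hinitB : ((PySem.List.sorted2 priorities.keys (fun op => priorities.getD op 0)
      (fun op => op)).foldl (fun d op => d.insert op ([] : List String)) PySem.Dict.empty)
      = mkB [] [] [] := by rw [sorted_ops]; rfl
  simp only [sort_query, sort_query_alt, hinitB]
  rw [show ((none : Option String), mkB [] [] []) = ((none : Option String), mkB [] [] []) from rfl]
  rw [hB]
  have hA' : query.foldl (stepA default_op) (priorities.getD default_op 0, default_op, [])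
      = (priorities.getD (pend'.getD default_op) 0, pend'.getD default_op, blocks3 la' lo' ln') := by
    have : blocks3 [] [] [] = ([] : List (Int × String)) := rfl
    rw [← this]
    simpa using hA
  rw [hA']
  simp only [items_mkB]
  rw [drainPops_len]
  congr 1
  simp only [blocks3, sSt, List.map_append, List.map_map, List.flatMap_cons, List.flatMap_nil,
    List.append_nil]
  rfl
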